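-- pv_equiv track=rewrite | github.com/LEEMINJOO/Algorithm | Baekjoon/10868 min value.py | make_min_tree
-- ===== SOURCE A (Python) =====
-- INF = 10**9+1
--
-- def make_min_tree(lst, depth):
-- 	tree = [INF for _ in range(2**depth)]
-- 	tree += lst
-- 	pos = (len(tree)-1)//2
-- 	if len(tree)%2 == 1 :
-- 		tree.append(INF)
-- 	for i in reversed(range(1,pos+1)):
-- 		tree[i] = min(tree[i*2],tree[i*2+1])
-- 	return tree
-- ===== SOURCE B (Python) =====
-- INF = 10**9+1
--
-- def make_min_tree(lst, depth):
-- 	tree = [INF for _ in range(2**depth)]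
-- 	tree += lst
-- 	pos = (len(tree)-1)//2
-- 	if len(tree)%2 == 1:
-- 		tree.append(INF)
-- 	def fill(i):
-- 		if 1 <= i <= pos:
-- 			tree[i] = min(fill(2*i), fill(2*i+1))
-- 		return tree[i]
-- 	if pos >= 1:
-- 		fill(1)
-- 	return tree
-- ===== Notes on version B (the rewrite author's own statement) =====
-- stated objective: alternative
-- what changed: The flat reversed bottom-up index sweep filling internal nodes is replaced by a recursive post-order fill over the implicit binary tree (fill(i) fills both children, then sets tree[i] = min of them), invoked once from the root.
import Mathlib
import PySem

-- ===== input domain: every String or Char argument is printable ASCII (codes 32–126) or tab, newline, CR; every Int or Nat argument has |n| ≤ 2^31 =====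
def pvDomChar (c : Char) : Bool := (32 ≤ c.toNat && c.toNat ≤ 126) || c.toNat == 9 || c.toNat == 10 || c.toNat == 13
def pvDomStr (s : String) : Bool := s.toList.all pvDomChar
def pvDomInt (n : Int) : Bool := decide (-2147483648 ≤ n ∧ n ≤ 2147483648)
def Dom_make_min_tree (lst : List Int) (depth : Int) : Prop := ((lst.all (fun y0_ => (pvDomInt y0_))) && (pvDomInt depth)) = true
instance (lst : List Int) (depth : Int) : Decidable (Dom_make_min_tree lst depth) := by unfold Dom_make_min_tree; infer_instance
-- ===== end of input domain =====

-- B replaces A's flat reversed bottom-up index sweep by a single recursive post-order fill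
-- of the implicit binary tree (objective: alternative decomposition; same cost).

-- ===== PORT A =====
def pvINF : Int := 10 ^ 9 + 1

-- tree[i] = min(tree[i*2], tree[i*2+1]); indices are in range on every admitted input,
-- so .toNat / .getD are mere totality guards.
def pvUpd (t : List Int) (i : Int) : List Int :=
  t.set i.toNat (min (t.getD (2 * i).toNat 0) (t.getD (2 * i + 1).toNat 0))

def make_min_tree (lst : List Int) (depth : Int) : List Int :=
  let tree := List.replicate (2 ^ depth.toNat) pvINF ++ lst   -- 2**depth; Pre_ gives 0 ≤ depth
  let pos : Int := PySem.Int.floordiv ((tree.length : Int) - 1) 2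
  let tree := if tree.length % 2 == 1 then tree ++ [pvINF] else tree
  (PySem.List.pyRange 1 (pos + 1) 1).reverse.foldl pvUpd tree

-- ===== PORT B =====
-- fill(i): post-order; returns (tree, tree[i]); in the internal case tree[i] has just been
-- set to min a.2 b.2 (and i ≤ pos < len on admitted inputs), so that value is returned
-- directly. The fuel parameter and the guard 1 ≤ i are totality guards only: fill is
-- invoked with fuel = pos ≥ pos + 1 - i (i starts at 1 and doubles), so fuel never runs out.
def pvFill (pos : Nat) (fuel : Nat) (i : Nat) (t : List Int) : List Int × Int :=
  match fuel with
  | 0 => (t, t.getD i 0)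
  | fuel + 1 =>
    if 1 ≤ i ∧ i ≤ pos then
      let a := pvFill pos fuel (2 * i) t
      let b := pvFill pos fuel (2 * i + 1) a.1
      let v := min a.2 b.2
      (b.1.set i v, v)
    else
      (t, t.getD i 0)

def make_min_tree_alt (lst : List Int) (depth : Int) : List Int :=
  let tree := List.replicate (2 ^ depth.toNat) pvINF ++ lst
  let pos : Int := PySem.Int.floordiv ((tree.length : Int) - 1) 2
  let tree := if tree.length % 2 == 1 then tree ++ [pvINF] else tree
  if 1 ≤ pos then (pvFill pos.toNat pos.toNat 1 tree).1 else tree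

-- ===== PRECONDITION & SPEC =====
-- For depth < 0 Python's 2**depth is a float and range(float) raises TypeError; A returns on all other inputs.
def Pre_make_min_tree (lst : List Int) (depth : Int) : Prop := 0 ≤ depth
instance (lst : List Int) (depth : Int) : Decidable (Pre_make_min_tree lst depth) := by
  unfold Pre_make_min_tree; infer_instance

def pvWitness_make_min_tree : List Int × Int := ([5, 2, 7], 2)

def Spec_make_min_tree (lst : List Int) (depth : Int) (out : List Int) : Prop := out = make_min_tree_alt lst depth
instance (lst : List Int) (depth : Int) (out : List Int) : Decidable (Spec_make_min_tree lst depth out) := by unfold Spec_make_min_tree; infer_instance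

-- ===== CLAIM (what is proved, stated in full; the proofs are below) =====
def Claim_equal_make_min_tree : Prop := ∀ (lst : List Int) (depth : Int), Dom_make_min_tree lst depth → Pre_make_min_tree lst depth → Spec_make_min_tree lst depth (make_min_tree lst depth)

-- ===== LEMMAS AND PROOFS =====

-- the intended value of node i (min-tree values), defined top-down
def pvVal (pos : Nat) (t0 : List Int) (i : Nat) : Int :=
  if h : 1 ≤ i ∧ i ≤ pos then min (pvVal pos t0 (2 * i)) (pvVal pos t0 (2 * i + 1))
  else t0.getD i 0
termination_by pos + 1 - i
decreasing_by all_goals omega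

-- j is a (weak) descendant of i in the implicit binary tree
def pvDesc (i j : Nat) : Bool :=
  if j < i then false else if j = i then true else pvDesc i (j / 2)
termination_by j
decreasing_by exact Nat.div_lt_self (by omega) (by norm_num)

-- A's loop, recursively: process indices k, k-1, …, 1
def pvLoop : Nat → List Int → List Int
  | 0, t => t
  | k + 1, t => pvLoop k (pvUpd t ((k : Int) + 1))

lemma getD_set_self (t : List Int) (i : Nat) (v : Int) (h : i < t.length) :
    (t.set i v).getD i 0 = v := by
  simp [List.getD_eq_getElem?_getD, h]

lemma getD_set_ne (t : List Int) (i j : Nat) (v : Int) (h : j ≠ i) :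
    (t.set i v).getD j 0 = t.getD j 0 := by
  simp [List.getD_eq_getElem?_getD, Ne.symm h]

lemma ext_getD {a b : List Int} (h : a.length = b.length)
    (hg : ∀ j, a.getD j 0 = b.getD j 0) : a = b := by
  apply List.ext_getElem h
  intro i h1 h2
  have := hg i
  rwa [List.getD_eq_getElem _ _ h1, List.getD_eq_getElem _ _ h2] at this

lemma pvUpd_nat (t : List Int) (k : Nat) :
    pvUpd t (k : Int) = t.set k (min (t.getD (2 * k) 0) (t.getD (2 * k + 1) 0)) := by
  have h1 : ((k : Int)).toNat = k := by omega
  have h2 : ((2 * (k : Int))).toNat = 2 * k := by omega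
  have h3 : ((2 * (k : Int) + 1)).toNat = 2 * k + 1 := by omega
  simp only [pvUpd, h1, h2, h3]

lemma pvVal_leaf (pos : Nat) (t0 : List Int) (i : Nat) (h : ¬ (1 ≤ i ∧ i ≤ pos)) :
    pvVal pos t0 i = t0.getD i 0 := by
  rw [pvVal]; simp [h]

lemma pvVal_node (pos : Nat) (t0 : List Int) (i : Nat) (h : 1 ≤ i ∧ i ≤ pos) :
    pvVal pos t0 i = min (pvVal pos t0 (2 * i)) (pvVal pos t0 (2 * i + 1)) := by
  rw [pvVal]; simp [h]

lemma pvDesc_le {i j : Nat} (h : pvDesc i j = true) : i ≤ j := by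
  rw [pvDesc] at h
  by_cases h1 : j < i
  · simp [h1] at h
  · omega

lemma pvDesc_self (i : Nat) : pvDesc i i = true := by rw [pvDesc]; simp

lemma pvDesc_one {j : Nat} (h : 1 ≤ j) : pvDesc 1 j = true := by
  induction j using Nat.strong_induction_on with
  | _ j ih =>
    rw [pvDesc]
    by_cases h1 : j = 1
    · simp [h1]
    · have hlt : ¬ j < 1 := by omega
      simp only [hlt, if_false, h1, if_false]
      exact ih (j / 2) (Nat.div_lt_self (by omega) (by norm_num)) (by omega)

lemma pvDesc_step {c j : Nat} (hc : pvDesc c (j / 2) = true) (hj : 2 ≤ j) : pvDesc c j = true := by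
  have hle : c ≤ j / 2 := pvDesc_le hc
  have h2 : j / 2 < j := Nat.div_lt_self (by omega) (by norm_num)
  rw [pvDesc]
  by_cases he : j = c
  · simp [he]
  · have : ¬ j < c := by omega
    simp only [this, if_false, he, if_false]
    exact hc

lemma pvDesc_unfold {i j : Nat} (h : pvDesc i j = true) (hne : j ≠ i) :
    pvDesc i (j / 2) = true := by
  have hle := pvDesc_le h
  rw [pvDesc] at h
  have h1 : ¬ j < i := by omega
  simpa [h1, hne] using h

lemma pvDesc_down {i j : Nat} (hi : 1 ≤ i) (h : pvDesc i j = true) (hne : j ≠ i) :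
    pvDesc (2 * i) j = true ∨ pvDesc (2 * i + 1) j = true := by
  induction j using Nat.strong_induction_on with
  | _ j ih =>
    have hle := pvDesc_le h
    have hj2 : 2 ≤ j := by omega
    have hrec := pvDesc_unfold h hne
    by_cases he : j / 2 = i
    · have : j = 2 * i ∨ j = 2 * i + 1 := by omega
      rcases this with h' | h' <;> [left; right] <;> rw [h'] <;> exact pvDesc_self _
    · have hlt : j / 2 < j := Nat.div_lt_self (by omega) (by norm_num)
      rcases ih (j / 2) hlt hrec he with h' | h'
      · exact Or.inl (pvDesc_step h' hj2)
      · exact Or.inr (pvDesc_step h' hj2)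

lemma pvDesc_up {i c j : Nat} (hi : 1 ≤ i) (hc : c = 2 * i ∨ c = 2 * i + 1)
    (h : pvDesc c j = true) : pvDesc i j = true ∧ j ≠ i := by
  induction j using Nat.strong_induction_on with
  | _ j ih =>
    have hle := pvDesc_le h
    have hji : j ≠ i := by omega
    have hj2 : 2 ≤ j := by omega
    refine ⟨?_, hji⟩
    by_cases he : j = c
    · have hhalf : j / 2 = i := by omega
      refine pvDesc_step ?_ hj2
      rw [hhalf]; exact pvDesc_self i
    · have hrec := pvDesc_unfold h he
      have hlt : j / 2 < j := Nat.div_lt_self (by omega) (by norm_num)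
      exact pvDesc_step (ih (j / 2) hlt hrec).1 hj2

lemma pvDesc_disjoint {i j : Nat} (hi : 1 ≤ i) :
    ¬ (pvDesc (2 * i) j = true ∧ pvDesc (2 * i + 1) j = true) := by
  induction j using Nat.strong_induction_on with
  | _ j ih =>
    rintro ⟨hl, hr⟩
    have h1 := pvDesc_le hl
    have h2 := pvDesc_le hr
    have hj2 : 2 ≤ j := by omega
    by_cases hel : j = 2 * i
    · omega
    · by_cases her : j = 2 * i + 1
      · subst her
        have := pvDesc_le (pvDesc_unfold hl (by omega))
        omega
      · have hlt : j / 2 < j := Nat.div_lt_self (by omega) (by norm_num)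
        exact ih (j / 2) hlt ⟨pvDesc_unfold hl hel, pvDesc_unfold hr her⟩

-- the recursive fill computes pvVal at every descendant node in [1, pos] and touches
-- nothing else, whenever it has enough fuel (pos + 1 ≤ fuel + i)
lemma pvFill_spec (pos : Nat) (t0 : List Int) (hpos : pos < t0.length) :
    ∀ fuel i t, pos + 1 ≤ fuel + i → 1 ≤ i → t.length = t0.length →
    (∀ j, pos < j → t.getD j 0 = t0.getD j 0) →
    (pvFill pos fuel i t).2 = pvVal pos t0 i ∧
    (pvFill pos fuel i t).1.length = t0.length ∧
    (∀ j, ¬ (pvDesc i j = true ∧ 1 ≤ j ∧ j ≤ pos) → (pvFill pos fuel i t).1.getD j 0 = t.getD j 0) ∧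
    (∀ j, pvDesc i j = true → 1 ≤ j → j ≤ pos → (pvFill pos fuel i t).1.getD j 0 = pvVal pos t0 j) := by
  intro fuel
  induction fuel with
  | zero =>
    intro i t hn hi hlen hhi
    have hguard : ¬ (1 ≤ i ∧ i ≤ pos) := by omega
    refine ⟨?_, hlen, fun j _ => rfl, fun j hd h1 h2 => ?_⟩
    · rw [pvVal_leaf pos t0 i hguard]
      exact hhi i (by omega)
    · exfalso; have := pvDesc_le hd; omega
  | succ fuel ih =>
    intro i t hn hi hlen hhi
    by_cases hguard : 1 ≤ i ∧ i ≤ pos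
    · have hL := ih (2 * i) t (by omega) (by omega) hlen hhi
      obtain ⟨hLv, hLlen, hLun, hLval⟩ := hL
      have hhi1 : ∀ j, pos < j → (pvFill pos fuel (2 * i) t).1.getD j 0 = t0.getD j 0 := by
        intro j hj
        rw [hLun j (by intro h; omega), hhi j hj]
      have hR := ih (2 * i + 1) (pvFill pos fuel (2 * i) t).1 (by omega) (by omega) hLlen hhi1
      obtain ⟨hRv, hRlen, hRun, hRval⟩ := hR
      simp only [pvFill]
      rw [if_pos hguard]
      have hset_len : ((pvFill pos fuel (2*i+1) (pvFill pos fuel (2*i) t).1).1.set i (min (pvFill pos fuel (2*i) t).2 (pvFill pos fuel (2*i+1) (pvFill pos fuel (2*i) t).1).2)).length = t0.length := by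
        rw [List.length_set]; exact hRlen
      have hvi : min (pvFill pos fuel (2*i) t).2 (pvFill pos fuel (2*i+1) (pvFill pos fuel (2*i) t).1).2 = pvVal pos t0 i := by
        rw [hLv, hRv, pvVal_node pos t0 i hguard]
      refine ⟨hvi, hset_len, ?_, ?_⟩
      · intro j hj
        have hji : j ≠ i := by
          intro h
          apply hj
          rw [h]
          exact ⟨pvDesc_self i, hguard.1, hguard.2⟩
        rw [getD_set_ne _ _ _ _ hji]
        have hjL : ¬ (pvDesc (2*i) j = true ∧ 1 ≤ j ∧ j ≤ pos) := by
          rintro ⟨hd, h1, h2⟩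
          exact hj ⟨(pvDesc_up hguard.1 (Or.inl rfl) hd).1, h1, h2⟩
        have hjR : ¬ (pvDesc (2*i+1) j = true ∧ 1 ≤ j ∧ j ≤ pos) := by
          rintro ⟨hd, h1, h2⟩
          exact hj ⟨(pvDesc_up hguard.1 (Or.inr rfl) hd).1, h1, h2⟩
        rw [hRun j hjR, hLun j hjL]
      · intro j hd h1 h2
        by_cases hji : j = i
        · subst hji
          rw [getD_set_self _ _ _ (by omega), hvi]
        · rw [getD_set_ne _ _ _ _ hji]
          rcases pvDesc_down hguard.1 hd hji with hc | hc
          · have hjR : ¬ (pvDesc (2*i+1) j = true ∧ 1 ≤ j ∧ j ≤ pos) := by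
              rintro ⟨hd', _, _⟩
              exact pvDesc_disjoint hguard.1 ⟨hc, hd'⟩
            rw [hRun j hjR]
            exact hLval j hc h1 h2
          · exact hRval j hc h1 h2
    · simp only [pvFill]
      rw [if_neg hguard]
      refine ⟨?_, hlen, fun j _ => rfl, fun j hd h1 h2 => ?_⟩
      · rw [pvVal_leaf pos t0 i hguard]
        exact hhi i (by omega)
      · exfalso; have := pvDesc_le hd; omega

-- A's downward sweep: processing k, k-1, …, 1 finalises every node of [1, pos]
lemma pvLoop_spec (pos : Nat) (t0 : List Int) (hpos : pos < t0.length) :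
    ∀ k t, k ≤ pos → t.length = t0.length →
    (∀ j, (j ≤ k ∨ pos < j) → t.getD j 0 = t0.getD j 0) →
    (∀ j, k < j → j ≤ pos → t.getD j 0 = pvVal pos t0 j) →
    (pvLoop k t).length = t0.length ∧
    (∀ j, (j = 0 ∨ pos < j) → (pvLoop k t).getD j 0 = t0.getD j 0) ∧
    (∀ j, 1 ≤ j → j ≤ pos → (pvLoop k t).getD j 0 = pvVal pos t0 j) := by
  intro k
  induction k with
  | zero =>
    intro t hk hlen hlow hhigh
    exact ⟨hlen, fun j hj => hlow j (by omega), fun j h1 h2 => hhigh j (by omega) h2⟩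
  | succ k ih =>
    intro t hk hlen hlow hhigh
    show (pvLoop k (pvUpd t ((k : Int) + 1))).length = t0.length ∧ _ ∧ _
    have hcast : ((k : Int) + 1) = ((k + 1 : Nat) : Int) := by push_cast; ring
    rw [hcast, pvUpd_nat]
    set t' := t.set (k + 1) (min (t.getD (2 * (k + 1)) 0) (t.getD (2 * (k + 1) + 1) 0)) with ht'
    have hchild : ∀ c, k + 1 < c → t.getD c 0 = pvVal pos t0 c := by
      intro c hc
      by_cases hcp : c ≤ pos
      · exact hhigh c (by omega) hcp
      · rw [hlow c (by omega), pvVal_leaf pos t0 c (by omega)]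
    have hval : min (t.getD (2 * (k + 1)) 0) (t.getD (2 * (k + 1) + 1) 0) = pvVal pos t0 (k + 1) := by
      rw [hchild (2 * (k + 1)) (by omega), hchild (2 * (k + 1) + 1) (by omega),
        pvVal_node pos t0 (k + 1) ⟨by omega, hk⟩]
    apply ih
    · omega
    · rw [ht', List.length_set]; exact hlen
    · intro j hj
      have hne : j ≠ k + 1 := by omega
      rw [ht', getD_set_ne _ _ _ _ hne]
      exact hlow j (by omega)
    · intro j h1 h2
      by_cases hje : j = k + 1
      · subst hje
        rw [ht', getD_set_self _ _ _ (by omega), hval]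
      · rw [ht', getD_set_ne _ _ _ _ hje]
        exact hhigh j (by omega) h2

lemma loop_eq (p : Nat) : ∀ t : List Int,
    (PySem.List.pyRange 1 ((p : Int) + 1) 1).reverse.foldl pvUpd t = pvLoop p t := by
  induction p with
  | zero =>
    intro t
    rw [PySem.List.pyRange_one_eq_nil (by norm_num)]
    rfl
  | succ p ih =>
    intro t
    have hcast : ((p + 1 : Nat) : Int) + 1 = ((p : Int) + 1) + 1 := by push_cast; ring
    rw [hcast, PySem.List.pyRange_one_succ_right (by omega)]
    rw [List.reverse_append, List.reverse_singleton, List.singleton_append, List.foldl_cons]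
    show (PySem.List.pyRange 1 ((p:Int)+1) 1).reverse.foldl pvUpd (pvUpd t ((p:Int)+1)) = pvLoop (p+1) t
    rw [ih]
    rfl

-- the two post-prefix phases agree on any array t0 with pos < len
lemma pvGlue (t0 : List Int) (posI : Int) (pN : Nat) (hp : posI = (pN : Int))
    (hpos : pN < t0.length) :
    (PySem.List.pyRange 1 (posI + 1) 1).reverse.foldl pvUpd t0
      = (if 1 ≤ posI then (pvFill posI.toNat posI.toNat 1 t0).1 else t0) := by
  subst hp
  rw [loop_eq pN t0]
  obtain ⟨hFlen, hF0, hFval⟩ :=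
    pvLoop_spec pN t0 hpos pN t0 le_rfl rfl (fun j _ => rfl)
      (fun j h1 h2 => absurd h1 (by omega))
  by_cases h1 : 1 ≤ pN
  · rw [if_pos (by exact_mod_cast h1)]
    obtain ⟨_, hGlen, hGun, hGval⟩ := pvFill_spec pN t0 hpos pN 1 t0 (by omega) le_rfl rfl (fun j _ => rfl)
    have htn : ((pN : Int)).toNat = pN := by omega
    rw [htn]
    apply ext_getD (by rw [hFlen, hGlen])
    intro j
    by_cases hj : 1 ≤ j ∧ j ≤ pN
    · rw [hFval j hj.1 hj.2, hGval j (pvDesc_one hj.1) hj.1 hj.2]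
    · rw [hF0 j (by omega), hGun j (by rintro ⟨hd, ha, hb⟩; exact hj ⟨ha, hb⟩)]
  · have hpN : pN = 0 := by omega
    rw [if_neg (by exact_mod_cast h1), hpN]
    rfl

-- ===== VERDICT (by name: the statement is the Claim_ definition above) =====
theorem make_min_tree_spec : Claim_equal_make_min_tree := by
  intro lst depth _ _
  unfold Spec_make_min_tree
  simp only [make_min_tree, make_min_tree_alt]
  set base := List.replicate (2 ^ depth.toNat) pvINF ++ lst with hbase
  set posI := PySem.Int.floordiv ((base.length : Int) - 1) 2 with hposI
  set t0 := if base.length % 2 == 1 then base ++ [pvINF] else base with ht0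
  have hn1 : 1 ≤ base.length := by
    have : 0 < 2 ^ depth.toNat := Nat.two_pow_pos _
    simp [hbase]
    omega
  have hp : posI = (((base.length - 1) / 2 : Nat) : Int) := by
    rw [hposI, PySem.Int.floordiv_eq_ediv_of_pos (by norm_num)]
    omega
  have hlen : base.length ≤ t0.length := by
    rw [ht0]; split_ifs <;> simp
  have hpos : (base.length - 1) / 2 < t0.length := by omega
  exact pvGlue t0 posI ((base.length - 1) / 2) hp hpos
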